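-- pv_equiv track=rewrite | github.com/nicosembiring/Program-pendaftaran-sederhana | uts/1174006/siap_jadwal_thread.py | convertKelasByNumber
-- ===== SOURCE A (Python) =====
-- import string
--
-- def convertKelasByNumber(kelas):
--     list_kelas = list(string.ascii_lowercase)
--     list_nomor = list(range(1, 27))
--     dict_kelas = dict(zip(list_nomor, list_kelas))
--     for k, v in dict_kelas.items():
--         if k == kelas:
--             return v.upper()
--             break
--     msg = "Kelas tidak terdaftar"
--     return msg
-- ===== SOURCE B (Python) =====
-- def convertKelasByNumber(kelas):
--     if kelas in range(1, 27):
--         return chr(64 + int(kelas))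
--     return "Kelas tidak terdaftar"
-- ===== Notes on version B (the rewrite author's own statement) =====
-- stated objective: simpler
-- what changed: Replaces the dict(zip(...)) table construction and linear scan with a closed-form range test and chr arithmetic.
import Mathlib
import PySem

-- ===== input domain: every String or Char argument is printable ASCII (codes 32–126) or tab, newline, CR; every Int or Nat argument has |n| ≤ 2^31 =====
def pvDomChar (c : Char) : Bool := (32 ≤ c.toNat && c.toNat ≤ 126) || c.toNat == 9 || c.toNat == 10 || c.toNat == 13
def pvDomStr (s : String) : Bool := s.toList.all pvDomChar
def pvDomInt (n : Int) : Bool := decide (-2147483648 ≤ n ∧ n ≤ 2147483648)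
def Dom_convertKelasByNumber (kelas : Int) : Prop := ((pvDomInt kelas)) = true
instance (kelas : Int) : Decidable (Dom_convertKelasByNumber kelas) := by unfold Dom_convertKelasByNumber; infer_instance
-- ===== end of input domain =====

-- B replaces A's dict(zip(...)) table and scanning loop with a closed-form range test and chr arithmetic (simpler).


-- ===== PORT A =====
def convertKelasByNumber.scan (kelas : Int) : List (Int × Char) → String
  | [] => "Kelas tidak terdaftar"
  | (k, v) :: rest =>
    if k == kelas then String.ofList (PySem.Chars.upper [v])
    else convertKelasByNumber.scan kelas rest

def convertKelasByNumber (kelas : Int) : String :=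
  let list_kelas : List Char := "abcdefghijklmnopqrstuvwxyz".toList
  let list_nomor : List Int := PySem.List.pyRange 1 27 1
  let dict_kelas : List (Int × Char) := list_nomor.zip list_kelas
  convertKelasByNumber.scan kelas dict_kelas

-- ===== PORT B =====
def convertKelasByNumber_alt (kelas : Int) : String :=
  if 1 ≤ kelas ∧ kelas ≤ 26 then String.ofList [Char.ofNat (64 + kelas.toNat)]
  else "Kelas tidak terdaftar"

-- ===== PRECONDITION & SPEC =====
def Spec_convertKelasByNumber (kelas : Int) (out : String) : Prop := out = convertKelasByNumber_alt kelas
instance (kelas : Int) (out : String) : Decidable (Spec_convertKelasByNumber kelas out) := by unfold Spec_convertKelasByNumber; infer_instance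

-- ===== CLAIM (what is proved, stated in full; the proofs are below) =====
def Claim_equal_convertKelasByNumber : Prop := ∀ (kelas : Int), Dom_convertKelasByNumber kelas → Spec_convertKelasByNumber kelas (convertKelasByNumber kelas)

-- ===== LEMMAS AND PROOFS =====

lemma scan_no_match (kelas : Int) (l : List (Int × Char))
    (h : ∀ p ∈ l, p.1 ≠ kelas) :
    convertKelasByNumber.scan kelas l = "Kelas tidak terdaftar" := by
  induction l with
  | nil => rfl
  | cons p rest ih =>
    obtain ⟨k, v⟩ := p
    have hk : k ≠ kelas := h (k, v) (List.mem_cons_self ..)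
    simp only [convertKelasByNumber.scan, beq_iff_eq, if_neg hk]
    exact ih (fun q hq => h q (List.mem_cons_of_mem _ hq))

-- ===== VERDICT (by name: the statement is the Claim_ definition above) =====
theorem convertKelasByNumber_spec : Claim_equal_convertKelasByNumber := by
  intro kelas _
  unfold Spec_convertKelasByNumber
  by_cases h : 1 ≤ kelas ∧ kelas ≤ 26
  · have hall : ∀ k ∈ PySem.List.pyRange 1 27 1,
        convertKelasByNumber k = convertKelasByNumber_alt k := by decide
    exact hall kelas (by
      simp only [PySem.List.mem_pyRange_one]
      omega)
  · have hA : convertKelasByNumber kelas = "Kelas tidak terdaftar" := by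
      apply scan_no_match
      intro p hp
      have hmem : p.1 ∈ PySem.List.pyRange 1 27 1 := (List.of_mem_zip hp).1
      have := PySem.List.mem_pyRange_one.mp hmem
      omega
    rw [hA, convertKelasByNumber_alt, if_neg h]
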